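-- pv_equiv track=rewrite | github.com/BenjyNStrauss/SwiPred9_Snapshot | src-py/proteinBERT/swipred_dataset.py | to10ClassSS
-- ===== SOURCE A (Python) =====
-- def to10ClassSS(line):
--     tokens = line.split(", ")
--     newLine = "".join(token[1] for token in tokens)
--     newLine = newLine.replace("5", "B")
--     newLine = newLine.replace("9", "C")
--     newLine = newLine.replace("6", "E")
--     newLine = newLine.replace("2", "G")
--     newLine = newLine.replace("1", "H")
--     newLine = newLine.replace("3", "I")
--     newLine = newLine.replace("4", "P")
--     newLine = newLine.replace("7", "S")
--     newLine = newLine.replace("8", "T")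
--     newLine = newLine.replace("0", "Z")
--     return newLine
-- ===== SOURCE B (Python) =====
-- def to10ClassSS(line):
--     # Single left-to-right scan over the raw string, consuming one token per step:
--     # translate the token's second character by positional indexing into "ZHGIPBESTC"
--     # (letter at index d is the code for digit d), then jump past the next ", ".
--     out = []
--     rest = line
--     while True:
--         c = rest[1]
--         out.append("ZHGIPBESTC"[int(c)] if c.isdigit() else c)
--         sep = rest.find(", ")
--         if sep == -1:
--             return "".join(out)
--         rest = rest[sep + 2:]
-- ===== Notes on version B (the rewrite author's own statement) =====
-- stated objective: alternative
-- what changed: Replaces A's tokenize-with-split, join-the-second-characters, then rescan-the-joined-string-ten-times replace chain by a single left-to-right scan over the raw string that consumes one token per step (find the next ', ' and slice past it) and translates each token's second character by positional indexing into the constant string 'ZHGIPBESTC'.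
import Mathlib
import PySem

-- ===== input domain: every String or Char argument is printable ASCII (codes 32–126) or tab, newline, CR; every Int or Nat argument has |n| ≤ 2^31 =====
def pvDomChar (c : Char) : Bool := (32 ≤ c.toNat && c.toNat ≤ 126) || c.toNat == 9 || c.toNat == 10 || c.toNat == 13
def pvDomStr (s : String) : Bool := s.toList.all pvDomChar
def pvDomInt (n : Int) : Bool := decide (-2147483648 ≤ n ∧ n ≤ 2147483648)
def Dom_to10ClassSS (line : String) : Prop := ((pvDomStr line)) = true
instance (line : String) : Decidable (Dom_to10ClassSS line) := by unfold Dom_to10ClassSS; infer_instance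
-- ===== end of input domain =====

-- B replaces A's tokenize-join-then-rescan-ten-times pipeline by one left-to-right scan over
-- the raw string that consumes one token per step and translates its second character by
-- positional indexing into "ZHGIPBESTC" (objective: alternative single-pass decomposition).

-- ===== PORT A =====
-- token[1] is ported as pyGet? with a dummy default ' '; Pre_to10ClassSS guarantees it is in range.
def to10ClassSS (line : String) : String :=
  let tokens := PySem.Chars.splitOn line.toList [',', ' ']
  let newLine := PySem.Chars.join [] (tokens.map (fun t => [(PySem.List.pyGet? t 1).getD ' ']))
  let n1 := PySem.Chars.replace newLine ['5'] ['B']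
  let n2 := PySem.Chars.replace n1 ['9'] ['C']
  let n3 := PySem.Chars.replace n2 ['6'] ['E']
  let n4 := PySem.Chars.replace n3 ['2'] ['G']
  let n5 := PySem.Chars.replace n4 ['1'] ['H']
  let n6 := PySem.Chars.replace n5 ['3'] ['I']
  let n7 := PySem.Chars.replace n6 ['4'] ['P']
  let n8 := PySem.Chars.replace n7 ['7'] ['S']
  let n9 := PySem.Chars.replace n8 ['8'] ['T']
  let n10 := PySem.Chars.replace n9 ['0'] ['Z']
  String.mk n10

-- ===== PORT B =====
-- the constant string "ZHGIPBESTC": the letter at index d is the code for digit d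
def lettersB : List Char := ['Z', 'H', 'G', 'I', 'P', 'B', 'E', 'S', 'T', 'C']

-- the while-loop of Source B, one step per token: rest[1] (pyGet? with dummy default ' ';
-- Pre_to10ClassSS guarantees it is in range), translate it, find ", ", slice rest[sep+2:].
def altGo (rest : List Char) : List Char :=
  let c := (PySem.List.pyGet? rest 1).getD ' '
  let m := if PySem.Chars.isdigit c then
             (PySem.List.pyGet? lettersB ((PySem.Int.ofStr? (String.mk [c])).getD 0)).getD c
           else c
  let sep := PySem.Chars.find rest [',', ' ']
  if hsep : sep = -1 then [m]
  else m :: altGo (PySem.List.slice rest (some (sep + 2)))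
termination_by rest.length
decreasing_by
  have h0 : (0 : Int) ≤ PySem.Chars.find rest [',', ' '] := by
    have := PySem.Chars.neg_one_le_find rest [',', ' ']; omega
  have hinf : [',', ' '] <:+: rest := (PySem.Chars.find_nonneg_iff rest [',', ' ']).mp h0
  have hlen : 2 ≤ rest.length := by have := hinf.length_le; simpa using this
  rw [PySem.List.slice_from rest (by omega)]
  simp only [List.length_drop]
  omega

def to10ClassSS_alt (line : String) : String :=
  String.mk (altGo line.toList)

-- ===== PRECONDITION & SPEC =====
-- Pre_ excludes exactly the inputs where some comma-space-separated token has fewer than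
-- 2 characters: there Python A raises IndexError on token[1].
def Pre_to10ClassSS (line : String) : Prop :=
  ∀ t ∈ PySem.Chars.splitOn line.toList [',', ' '], 2 ≤ t.length
instance (line : String) : Decidable (Pre_to10ClassSS line) := by unfold Pre_to10ClassSS; infer_instance

def pvWitness_to10ClassSS : String := "A5, B9, x6"

def Spec_to10ClassSS (line : String) (out : String) : Prop := out = to10ClassSS_alt line
instance (line : String) (out : String) : Decidable (Spec_to10ClassSS line out) := by unfold Spec_to10ClassSS; infer_instance

-- ===== CLAIM (what is proved, stated in full; the proofs are below) =====
def Claim_equal_to10ClassSS : Prop := ∀ (line : String), Dom_to10ClassSS line → Pre_to10ClassSS line → Spec_to10ClassSS line (to10ClassSS line)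

-- ===== LEMMAS AND PROOFS =====

-- the ten single-character substitutions of A, as named functions
def t5 (x : Char) : Char := if x = '5' then 'B' else x
def t9 (x : Char) : Char := if x = '9' then 'C' else x
def t6 (x : Char) : Char := if x = '6' then 'E' else x
def t2 (x : Char) : Char := if x = '2' then 'G' else x
def t1 (x : Char) : Char := if x = '1' then 'H' else x
def t3 (x : Char) : Char := if x = '3' then 'I' else x
def t4 (x : Char) : Char := if x = '4' then 'P' else x
def t7 (x : Char) : Char := if x = '7' then 'S' else x
def t8 (x : Char) : Char := if x = '8' then 'T' else x
def t0 (x : Char) : Char := if x = '0' then 'Z' else x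

-- A's ten substitutions composed into one character map
def tcomp (x : Char) : Char := t0 (t8 (t7 (t4 (t3 (t1 (t2 (t6 (t9 (t5 x)))))))))

theorem replace_single_go (c d : Char) (l acc : List Char) (fuel : Nat) (h : l.length ≤ fuel) :
    PySem.Chars.replace.go [c] [d] fuel l acc
      = acc.reverse ++ l.map (fun x => if x = c then d else x) := by
  induction l generalizing acc fuel with
  | nil => cases fuel <;> simp [PySem.Chars.replace.go]
  | cons x t ih =>
    cases fuel with
    | zero => simp at h
    | succ n =>
      simp only [PySem.Chars.replace.go]
      simp at h
      by_cases hx : c = x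
      · subst hx
        simp [List.isPrefixOf, ih (d :: acc) n h]
      · simp [List.isPrefixOf, Ne.symm hx, hx, ih (x :: acc) n h]

theorem replace_single (c d : Char) (s : List Char) :
    PySem.Chars.replace s [c] [d] = s.map (fun x => if x = c then d else x) := by
  simp [PySem.Chars.replace, replace_single_go c d s [] s.length le_rfl]

theorem replace_t5 (s : List Char) : PySem.Chars.replace s ['5'] ['B'] = s.map t5 := replace_single '5' 'B' s
theorem replace_t9 (s : List Char) : PySem.Chars.replace s ['9'] ['C'] = s.map t9 := replace_single '9' 'C' s
theorem replace_t6 (s : List Char) : PySem.Chars.replace s ['6'] ['E'] = s.map t6 := replace_single '6' 'E' s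
theorem replace_t2 (s : List Char) : PySem.Chars.replace s ['2'] ['G'] = s.map t2 := replace_single '2' 'G' s
theorem replace_t1 (s : List Char) : PySem.Chars.replace s ['1'] ['H'] = s.map t1 := replace_single '1' 'H' s
theorem replace_t3 (s : List Char) : PySem.Chars.replace s ['3'] ['I'] = s.map t3 := replace_single '3' 'I' s
theorem replace_t4 (s : List Char) : PySem.Chars.replace s ['4'] ['P'] = s.map t4 := replace_single '4' 'P' s
theorem replace_t7 (s : List Char) : PySem.Chars.replace s ['7'] ['S'] = s.map t7 := replace_single '7' 'S' s
theorem replace_t8 (s : List Char) : PySem.Chars.replace s ['8'] ['T'] = s.map t8 := replace_single '8' 'T' s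
theorem replace_t0 (s : List Char) : PySem.Chars.replace s ['0'] ['Z'] = s.map t0 := replace_single '0' 'Z' s

theorem join_map_singleton (f : List Char → Char) (ts : List (List Char)) :
    PySem.Chars.join [] (ts.map (fun t => [f t])) = ts.map f := by
  rw [show (ts.map fun t => [f t]) = (ts.map f).map (fun c => [c]) by
        rw [List.map_map]; rfl]
  exact PySem.Chars.join_nil_singletons _

-- chained maps of the ten substitutions = one map by their composition
theorem chain (l : List Char) :
    (((((((((l.map t5).map t9).map t6).map t2).map t1).map t3).map t4).map t7).map t8).map t0
      = l.map tcomp := by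
  induction l with
  | nil => simp only [List.map_nil]
  | cons c cs ih => simp only [List.map_cons, ih]; rfl

-- ========= characterizing splitOn by its first-separator recursion =========

-- find.go shifts its offset uniformly
theorem findGo_shift (l : List Char) (k : Nat) :
    PySem.Chars.find.go [',', ' '] l (k + 1)
      = if PySem.Chars.find.go [',', ' '] l k = -1 then -1
        else PySem.Chars.find.go [',', ' '] l k + 1 := by
  induction l generalizing k with
  | nil => simp [PySem.Chars.find.go]
  | cons c rest ih =>
    by_cases hp : List.isPrefixOf [',', ' '] (c :: rest) = true
    · rw [PySem.Chars.find.go, PySem.Chars.find.go]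
      simp [hp]
    · rw [PySem.Chars.find.go, PySem.Chars.find.go]
      simp only [hp, Bool.false_eq_true, if_false]
      exact ih (k + 1)

theorem find_nil_sep : PySem.Chars.find [] [',', ' '] = -1 := by
  rw [PySem.Chars.find, PySem.Chars.find.go]; rfl

theorem find_cons_prefix (c : Char) (rest : List Char)
    (hp : List.isPrefixOf [',', ' '] (c :: rest) = true) :
    PySem.Chars.find (c :: rest) [',', ' '] = 0 := by
  rw [PySem.Chars.find, PySem.Chars.find.go]; simp [hp]

theorem find_cons_not_prefix (c : Char) (rest : List Char)
    (hp : ¬ List.isPrefixOf [',', ' '] (c :: rest) = true) :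
    PySem.Chars.find (c :: rest) [',', ' ']
      = if PySem.Chars.find rest [',', ' '] = -1 then -1
        else PySem.Chars.find rest [',', ' '] + 1 := by
  rw [PySem.Chars.find, PySem.Chars.find.go]
  simp only [hp, Bool.false_eq_true, if_false]
  exact findGo_shift rest 0

-- the clean recursive specification of splitting on ", ": first separator, then recurse
def splitSpec (l : List Char) : List (List Char) :=
  if hj : PySem.Chars.find l [',', ' '] = -1 then [l]
  else l.take (PySem.Chars.find l [',', ' ']).toNat
        :: splitSpec (l.drop ((PySem.Chars.find l [',', ' ']).toNat + 2))
termination_by l.length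
decreasing_by
  have h0 : (0 : Int) ≤ PySem.Chars.find l [',', ' '] := by
    have := PySem.Chars.neg_one_le_find l [',', ' ']; omega
  have hinf : [',', ' '] <:+: l := (PySem.Chars.find_nonneg_iff l [',', ' ']).mp h0
  have hlen : 2 ≤ l.length := by have := hinf.length_le; simpa using this
  simp only [List.length_drop]; omega

theorem splitSpec_ne_nil (l : List Char) : splitSpec l ≠ [] := by
  rw [splitSpec]; split <;> simp

theorem splitSpec_headI_tail (l : List Char) :
    (splitSpec l).headI :: (splitSpec l).tail = splitSpec l := by
  cases h : splitSpec l with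
  | nil => exact absurd h (splitSpec_ne_nil l)
  | cons a b => simp

theorem splitOnGo_spec (fuel : Nat) : ∀ (l cur : List Char) (acc : List (List Char)),
    l.length < fuel →
    PySem.Chars.splitOn.go [',', ' '] fuel l cur acc
      = acc.reverse ++ (cur.reverse ++ (splitSpec l).headI) :: (splitSpec l).tail := by
  induction fuel with
  | zero => intro l cur acc h; omega
  | succ n ih =>
    intro l cur acc h
    cases l with
    | nil =>
      rw [show splitSpec [] = [[]] by rw [splitSpec]; simp [find_nil_sep]]
      rw [PySem.Chars.splitOn.go]
      · simp
      · omega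
    | cons c rest =>
      by_cases hp : List.isPrefixOf [',', ' '] (c :: rest) = true
      · have hfind := find_cons_prefix c rest hp
        have hss : splitSpec (c :: rest)
            = [] :: splitSpec (List.drop 2 (c :: rest)) := by
          rw [splitSpec]
          rw [dif_neg (by rw [hfind]; omega)]
          rw [hfind]
          rfl
        rw [PySem.Chars.splitOn.go]
        simp only [hp, if_true]
        rw [show ([',', ' '] : List Char).length = 2 from rfl]
        rw [ih (List.drop 2 (c :: rest)) [] (cur.reverse :: acc)
              (by simp at h ⊢; omega)]
        rw [hss]
        simp [splitSpec_headI_tail]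
      · have hfind := find_cons_not_prefix c rest hp
        rw [PySem.Chars.splitOn.go]
        simp only [hp, Bool.false_eq_true, if_false]
        rw [ih rest (c :: cur) acc (by simp at h ⊢; omega)]
        by_cases hr : PySem.Chars.find rest [',', ' '] = -1
        · have hss : splitSpec (c :: rest) = [c :: rest] := by
            rw [splitSpec]; rw [dif_pos (by rw [hfind]; simp [hr])]
          have hss' : splitSpec rest = [rest] := by
            rw [splitSpec]; rw [dif_pos hr]
          rw [hss, hss']
          simp
        · have h0 : (0 : Int) ≤ PySem.Chars.find rest [',', ' '] := by
            have := PySem.Chars.neg_one_le_find rest [',', ' ']; omega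
          have hfind' : PySem.Chars.find (c :: rest) [',', ' ']
              = PySem.Chars.find rest [',', ' '] + 1 := by rw [hfind, if_neg hr]
          have htn : (PySem.Chars.find rest [',', ' '] + 1).toNat
              = (PySem.Chars.find rest [',', ' ']).toNat + 1 := by omega
          have hss : splitSpec (c :: rest)
              = (c :: rest.take (PySem.Chars.find rest [',', ' ']).toNat)
                :: splitSpec (rest.drop ((PySem.Chars.find rest [',', ' ']).toNat + 2)) := by
            rw [splitSpec]
            rw [dif_neg (by rw [hfind']; omega)]
            rw [hfind', htn]
            rw [List.take_succ_cons, List.drop_succ_cons]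
          have hss' : splitSpec rest
              = rest.take (PySem.Chars.find rest [',', ' ']).toNat
                :: splitSpec (rest.drop ((PySem.Chars.find rest [',', ' ']).toNat + 2)) := by
            rw [splitSpec]; rw [dif_neg hr]
          rw [hss, hss']
          simp

theorem splitOn_eq_splitSpec (l : List Char) :
    PySem.Chars.splitOn l [',', ' '] = splitSpec l := by
  rw [PySem.Chars.splitOn]
  rw [splitOnGo_spec (l.length + 1) l [] [] (by omega)]
  simp [splitSpec_headI_tail]

-- ========= the per-character maps agree =========

theorem char_eq_of_toNat {c d : Char} (h : c.toNat = d.toNat) : c = d := by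
  apply Char.ext; exact UInt32.toNat_inj.mp h

-- B's indexed lookup equals A's composed substitutions, pointwise
theorem pointB (c : Char) :
    (if PySem.Chars.isdigit c then
       (PySem.List.pyGet? lettersB ((PySem.Int.ofStr? (String.mk [c])).getD 0)).getD c
     else c) = tcomp c := by
  by_cases h0 : c = '0'; · subst h0; decide
  by_cases h1 : c = '1'; · subst h1; decide
  by_cases h2 : c = '2'; · subst h2; decide
  by_cases h3 : c = '3'; · subst h3; decide
  by_cases h4 : c = '4'; · subst h4; decide
  by_cases h5 : c = '5'; · subst h5; decide
  by_cases h6 : c = '6'; · subst h6; decide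
  by_cases h7 : c = '7'; · subst h7; decide
  by_cases h8 : c = '8'; · subst h8; decide
  by_cases h9 : c = '9'; · subst h9; decide
  have hd : PySem.Chars.isdigit c = false := by
    by_contra hcon
    have hd' : PySem.Chars.isdigit c = true := by
      cases hh : PySem.Chars.isdigit c
      · exact absurd hh hcon
      · rfl
    simp only [PySem.Chars.isdigit, Bool.and_eq_true, decide_eq_true_eq, Char.le_def,
               UInt32.le_iff_toNat_le] at hd'
    have hb : 48 ≤ c.toNat ∧ c.toNat ≤ 57 := by
      constructor
      · simpa using hd'.1
      · simpa using hd'.2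
    have hten : c.toNat = 48 ∨ c.toNat = 49 ∨ c.toNat = 50 ∨ c.toNat = 51 ∨ c.toNat = 52 ∨
        c.toNat = 53 ∨ c.toNat = 54 ∨ c.toNat = 55 ∨ c.toNat = 56 ∨ c.toNat = 57 := by omega
    rcases hten with h|h|h|h|h|h|h|h|h|h <;>
      first
      | exact h0 (char_eq_of_toNat h)
      | exact h1 (char_eq_of_toNat h)
      | exact h2 (char_eq_of_toNat h)
      | exact h3 (char_eq_of_toNat h)
      | exact h4 (char_eq_of_toNat h)
      | exact h5 (char_eq_of_toNat h)
      | exact h6 (char_eq_of_toNat h)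
      | exact h7 (char_eq_of_toNat h)
      | exact h8 (char_eq_of_toNat h)
      | exact h9 (char_eq_of_toNat h)
  simp only [hd, Bool.false_eq_true, if_false, tcomp, t5, t9, t6, t2, t1, t3, t4, t7, t8, t0,
             h0, h1, h2, h3, h4, h5, h6, h7, h8, h9, if_false]

-- ========= B's scan computes A's per-token map over splitSpec =========

theorem altGo_spec (l : List Char)
    (hpre : ∀ t ∈ splitSpec l, 2 ≤ t.length) :
    altGo l = (splitSpec l).map (fun t => tcomp ((PySem.List.pyGet? t 1).getD ' ')) := by
  by_cases hj : PySem.Chars.find l [',', ' '] = -1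
  · have hss : splitSpec l = [l] := by rw [splitSpec]; rw [dif_pos hj]
    rw [altGo]
    rw [dif_pos hj, hss]
    simp only [List.map_cons, List.map_nil]
    rw [pointB]
  · have h0 : (0 : Int) ≤ PySem.Chars.find l [',', ' '] := by
      have := PySem.Chars.neg_one_le_find l [',', ' ']; omega
    have hss : splitSpec l
        = l.take (PySem.Chars.find l [',', ' ']).toNat
          :: splitSpec (l.drop ((PySem.Chars.find l [',', ' ']).toNat + 2)) := by
      rw [splitSpec]; rw [dif_neg hj]
    have hslice : PySem.List.slice l (some (PySem.Chars.find l [',', ' '] + 2))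
        = l.drop ((PySem.Chars.find l [',', ' ']).toNat + 2) := by
      rw [PySem.List.slice_from l (by omega)]
      congr 1; omega
    have htok : 2 ≤ (l.take (PySem.Chars.find l [',', ' ']).toNat).length := by
      apply hpre; rw [hss]; exact List.mem_cons_self
    have hget : (PySem.List.pyGet? (l.take (PySem.Chars.find l [',', ' ']).toNat) 1).getD ' '
        = (PySem.List.pyGet? l 1).getD ' ' := by
      have h1 : 1 < (PySem.Chars.find l [',', ' ']).toNat := by
        simp at htok; omega
      rw [show ((1 : Int)) = ((1 : Nat) : Int) by rfl,
          PySem.List.pyGet?_natCast, PySem.List.pyGet?_natCast, List.getElem?_take]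
      simp [h1]
    have hrec := altGo_spec (l.drop ((PySem.Chars.find l [',', ' ']).toNat + 2))
      (fun t ht => hpre t (by rw [hss]; exact List.mem_cons_of_mem _ ht))
    rw [altGo]
    rw [dif_neg hj, hslice, hrec, hss]
    simp only [List.map_cons]
    rw [pointB, hget]
termination_by l.length
decreasing_by
  have hinf : [',', ' '] <:+: l := (PySem.Chars.find_nonneg_iff l [',', ' ']).mp h0
  have hlen : 2 ≤ l.length := by have := hinf.length_le; simpa using this
  simp only [List.length_drop]; omega

-- ===== VERDICT (by name: the statement is the Claim_ definition above) =====
theorem to10ClassSS_spec : Claim_equal_to10ClassSS := by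
  intro line _ hpre
  unfold Spec_to10ClassSS
  rw [show to10ClassSS line
        = String.mk ((((((((((((PySem.Chars.splitOn line.toList [',', ' ']).map
            (fun t => [(PySem.List.pyGet? t 1).getD ' '])
            |> PySem.Chars.join []).map t5).map t9).map t6).map t2).map t1).map t3).map
            t4).map t7).map t8).map t0)
      by rw [to10ClassSS]
         rw [replace_t5, replace_t9, replace_t6, replace_t2, replace_t1, replace_t3,
             replace_t4, replace_t7, replace_t8, replace_t0]]
  rw [join_map_singleton (fun t => (PySem.List.pyGet? t 1).getD ' '), chain,
      splitOn_eq_splitSpec, List.map_map]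
  rw [to10ClassSS_alt]
  rw [altGo_spec line.toList (by
    intro t ht
    apply hpre
    rwa [splitOn_eq_splitSpec])]
  simp only [Function.comp_def]
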